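-- pv_equiv track=rewrite | github.com/pranaliSawadh/python-practical | calendar/final.py | display_month
-- ===== SOURCE A (Python) =====
-- def is_leap_year(year):
--     return (year % 4 == 0 and year % 100 != 0) or (year % 400 == 0)
--
-- def get_first_day_of_month(month, year):
--     if month < 3:
--         month += 12
--         year -= 1
--     k = 1  # Day of the month
--     D = year % 100
--     C = year // 100
--     f = k + (13 * (month + 1)) // 5 + D + (D // 4) + (C // 4) - (2 * C)
--     fmod7 = f % 7
--     fmod7_day = {0: "Sat", 1: "Sun", 2: "Mon", 3: "Tue", 4: "Wed", 5: "Thu", 6: "Fri"}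
--     return fmod7_day[fmod7]
--
-- def display_month(year, month):
--     if is_leap_year(year):
--         day_in_month = [31, 29, 31, 30, 31, 30, 31, 31, 30, 31, 30, 31]
--     else:
--         day_in_month = [31, 28, 31, 30, 31, 30, 31, 31, 30, 31, 30, 31]
--
--     month_names = ["January", "February", "March", "April", "May", "June",
--                    "July", "August", "September", "October", "November", "December"]
--
--     start_day = get_first_day_of_month(month, year)
--     days_of_week = ["Mon", "Tue", "Wed", "Thu", "Fri", "Sat", "Sun"]
--     start_day_index = days_of_week.index(start_day)
--
--     # Prepare month header and weekdays
--     header = f"{month_names[month - 1]} {year}".center(20)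
--     weekdays = " Mon  Tue  Wed  Thu  Fri  Sat  Sun "
--
--     # Generate month layout
--     calendar_lines = [header, weekdays]
--     line = "     " * start_day_index
--     date = 1
--
--     # Fill days of the month
--     for _ in range(start_day_index, 7):
--         if date <= day_in_month[month - 1]:
--             line += f"{date:3}  "
--             date += 1
--         else:
--             line += "     "  # Empty space for unused dates
--     calendar_lines.append(line)
--
--     while date <= day_in_month[month - 1]:
--         line = ""
--         for _ in range(7):
--             if date <= day_in_month[month - 1]:
--                 line += f"{date:3}  "
--                 date += 1
--             else:
--                 line += "     "  # Empty space for unused dates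
--         calendar_lines.append(line)
--
--     return calendar_lines
-- ===== SOURCE B (Python) =====
-- def display_month(year, month):
--     leap = (year % 4 == 0 and year % 100 != 0) or (year % 400 == 0)
--     day_in_month = [31, 29 if leap else 28, 31, 30, 31, 30, 31, 31, 30, 31, 30, 31]
--     month_names = ["January", "February", "March", "April", "May", "June",
--                    "July", "August", "September", "October", "November", "December"]
--
--     # Zeller's congruence, mapped straight to a Monday-based index (no name lookup)
--     m, y = (month + 12, year - 1) if month < 3 else (month, year)
--     f = 1 + (13 * (m + 1)) // 5 + (y % 100) + (y % 100) // 4 + (y // 100) // 4 - 2 * (y // 100)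
--     start = (f + 5) % 7
--
--     n = day_in_month[month - 1]
--     header = f"{month_names[month - 1]} {year}".center(20)
--     weekdays = " Mon  Tue  Wed  Thu  Fri  Sat  Sun "
--
--     cells = ["     "] * start + [f"{d:3}  " for d in range(1, n + 1)]
--     while len(cells) % 7:
--         cells.append("     ")
--     return [header, weekdays] + ["".join(cells[i:i + 7]) for i in range(0, len(cells), 7)]
-- ===== Notes on version B (the rewrite author's own statement) =====
-- stated objective: simpler
-- what changed: B replaces A's weekday-name dict lookup + list.index with a direct (f+5)%7 arithmetic index, and builds the grid as one flat list of 5-char cells padded to a multiple of 7 and chunked into rows, instead of A's imperative first-row loop plus while-loop with a threaded date counter.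
import Mathlib
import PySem

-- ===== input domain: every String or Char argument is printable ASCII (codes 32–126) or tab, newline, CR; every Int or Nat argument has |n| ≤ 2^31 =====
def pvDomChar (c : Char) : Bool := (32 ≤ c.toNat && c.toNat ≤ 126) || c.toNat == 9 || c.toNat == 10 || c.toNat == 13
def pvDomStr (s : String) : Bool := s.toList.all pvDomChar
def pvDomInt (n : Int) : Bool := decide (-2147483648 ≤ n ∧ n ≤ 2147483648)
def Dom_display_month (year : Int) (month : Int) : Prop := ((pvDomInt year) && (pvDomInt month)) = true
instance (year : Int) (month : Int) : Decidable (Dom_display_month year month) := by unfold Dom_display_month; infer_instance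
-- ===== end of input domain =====

-- B builds the month grid as one flat list of 5-char cells chunked into rows (and maps Zeller's
-- value straight to a Monday-based index), instead of A's imperative first-row/while-loop row
-- building through a weekday-name lookup; objective: simpler.

-- ===== PORT A =====

-- shared string primitives, ported by hand:
-- blank5 = "     ", cellOf d = f"{d:3}  " (right-justify str(d) to width 3, then two spaces),
-- pyCenter20 s = s.center(20) (CPython: left margin = marg//2 + (marg & width & 1)); exact.
def blank5 : List Char := [' ', ' ', ' ', ' ', ' ']

def cellOf (d : Int) : List Char :=
  List.replicate (3 - (PySem.Int.toChars d).length) ' ' ++ PySem.Int.toChars d ++ [' ', ' ']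

def pyCenter20 (s : List Char) : List Char :=
  if 20 ≤ s.length then s
  else
    let marg := 20 - s.length
    let left := marg / 2 + (marg &&& 20 &&& 1)
    List.replicate left ' ' ++ s ++ List.replicate (marg - left) ' '

def is_leap_year (year : Int) : Bool :=
  (PySem.Int.mod year 4 == 0 && !(PySem.Int.mod year 100 == 0)) || PySem.Int.mod year 400 == 0

def fmod7Day : PySem.Dict Int String :=
  PySem.Dict.mk [(0, "Sat"), (1, "Sun"), (2, "Mon"), (3, "Tue"), (4, "Wed"), (5, "Thu"), (6, "Fri")]

def get_first_day_of_month (month : Int) (year : Int) : String :=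
  let p := if month < 3 then (month + 12, year - 1) else (month, year)
  let k : Int := 1
  let D := PySem.Int.mod p.2 100
  let C := PySem.Int.floordiv p.2 100
  let f := k + PySem.Int.floordiv (13 * (p.1 + 1)) 5 + D + PySem.Int.floordiv D 4 +
            PySem.Int.floordiv C 4 - 2 * C
  -- the dict lookup always hits: mod f 7 ∈ 0..6 (getD "" is never the KeyError branch)
  (fmod7Day.get? (PySem.Int.mod f 7)).getD ""

def monthNames : List String :=
  ["January", "February", "March", "April", "May", "June",
   "July", "August", "September", "October", "November", "December"]

def daysOfWeek : List String := ["Mon", "Tue", "Wed", "Thu", "Fri", "Sat", "Sun"]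

def weekdaysChars : List Char := " Mon  Tue  Wed  Thu  Fri  Sat  Sun ".toList

-- A's inner 'for _ in range(...)' over one row: count iterations, threading (date, line)
def fillRow : Nat → Int → Int → List Char → Int × List Char
  | 0, date, _, line => (date, line)
  | c + 1, date, N, line =>
    if date ≤ N then fillRow c (date + 1) N (line ++ cellOf date)
    else fillRow c date N (line ++ blank5)

-- A's 'while date <= day_in_month[month-1]' loop; the fuel (N+1-date)+1 is enough because each
-- executed iteration increases date by at least 1 (so the 'if' always decides termination first)
def whileGo : Nat → Int → Int → List (List Char) → List (List Char)
  | 0, _, _, acc => acc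
  | fuel + 1, date, N, acc =>
    if date ≤ N then
      let p := fillRow 7 date N []
      whileGo fuel p.1 N (acc ++ [p.2])
    else acc

-- A's whole grid below the two header lines: first (possibly indented) row, then the while loop
def rowsA (sdi : Nat) (N : Int) : List (List Char) :=
  let p := fillRow (7 - sdi) 1 N (List.replicate sdi blank5).flatten
  whileGo ((N + 1 - p.1).toNat + 1) p.1 N [p.2]

def display_month (year : Int) (month : Int) : List String :=
  let day_in_month : List Int :=
    if is_leap_year year then [31, 29, 31, 30, 31, 30, 31, 31, 30, 31, 30, 31]
    else [31, 28, 31, 30, 31, 30, 31, 31, 30, 31, 30, 31]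
  let start_day := get_first_day_of_month month year
  let sdi : Nat := (PySem.List.index? daysOfWeek start_day).getD 0
  let header := pyCenter20 (((PySem.List.pyGet? monthNames (month - 1)).getD "").toList
                  ++ ' ' :: PySem.Int.toChars year)
  let N := (PySem.List.pyGet? day_in_month (month - 1)).getD 0
  (header :: weekdaysChars :: rowsA sdi N).map (fun cs => String.ofList cs)

-- ===== PORT B =====

def cellsB (start : Nat) (N : Int) : List (List Char) :=
  List.replicate start blank5 ++ (PySem.List.pyRange 1 (N + 1) 1).map cellOf

-- Source B's 'while len(cells) % 7: cells.append(blank)'; exact fuel: the loop runs (7 - len%7) % 7 times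
def padGo : Nat → List (List Char) → List (List Char)
  | 0, cs => cs
  | f + 1, cs => if cs.length % 7 = 0 then cs else padGo f (cs ++ [blank5])

def rowsB (start : Nat) (N : Int) : List (List Char) :=
  let cs := padGo ((7 - (cellsB start N).length % 7) % 7) (cellsB start N)
  (PySem.List.pyRange 0 (cs.length : Int) 7).map
    (fun i => (PySem.List.slice cs (some i) (some (i + 7))).flatten)

def display_month_alt (year : Int) (month : Int) : List String :=
  let leap := (PySem.Int.mod year 4 == 0 && !(PySem.Int.mod year 100 == 0)) ||
              PySem.Int.mod year 400 == 0
  let day_in_month : List Int :=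
    [31, if leap then 29 else 28, 31, 30, 31, 30, 31, 31, 30, 31, 30, 31]
  let p := if month < 3 then (month + 12, year - 1) else (month, year)
  let f := 1 + PySem.Int.floordiv (13 * (p.1 + 1)) 5 + PySem.Int.mod p.2 100 +
            PySem.Int.floordiv (PySem.Int.mod p.2 100) 4 +
            PySem.Int.floordiv (PySem.Int.floordiv p.2 100) 4 -
            2 * PySem.Int.floordiv p.2 100
  let start := PySem.Int.mod (f + 5) 7
  let header := pyCenter20 (((PySem.List.pyGet? monthNames (month - 1)).getD "").toList
                  ++ ' ' :: PySem.Int.toChars year)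
  let N := (PySem.List.pyGet? day_in_month (month - 1)).getD 0
  (header :: weekdaysChars :: rowsB start.toNat N).map (fun cs => String.ofList cs)

-- ===== PRECONDITION & SPEC =====
-- Pre_ excludes exactly the months outside -11..12, where both Pythons raise IndexError on
-- day_in_month[month - 1] (negative months down to -11 index from the back and both return).
def Pre_display_month (year : Int) (month : Int) : Prop := -11 ≤ month ∧ month ≤ 12
instance (year : Int) (month : Int) : Decidable (Pre_display_month year month) := by
  unfold Pre_display_month; infer_instance

def pvWitness_display_month : Int × Int := (2024, 2)

def Spec_display_month (year : Int) (month : Int) (out : List String) : Prop := out = display_month_alt year month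
instance (year : Int) (month : Int) (out : List String) : Decidable (Spec_display_month year month out) := by unfold Spec_display_month; infer_instance

-- ===== CLAIM (what is proved, stated in full; the proofs are below) =====
def Claim_equal_display_month : Prop := ∀ (year : Int) (month : Int), Dom_display_month year month → Pre_display_month year month → Spec_display_month year month (display_month year month)

-- ===== LEMMAS AND PROOFS =====

-- A's name lookup + days_of_week.index equals B's direct (f+5) % 7 index
theorem sdi_start (f : Int) :
    ((PySem.List.index? daysOfWeek ((fmod7Day.get? (PySem.Int.mod f 7)).getD "")).getD 0 : Nat) =
      (PySem.Int.mod (f + 5) 7).toNat := by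
  rw [PySem.Int.mod_eq_emod_of_pos (a := f) (by omega), PySem.Int.mod_eq_emod_of_pos (a := f + 5) (by omega)]
  have h : f % 7 = 0 ∨ f % 7 = 1 ∨ f % 7 = 2 ∨ f % 7 = 3 ∨ f % 7 = 4 ∨ f % 7 = 5 ∨ f % 7 = 6 := by
    omega
  rcases h with h | h | h | h | h | h | h <;>
    · have h2 : (f + 5) % 7 = (f % 7 + 5) % 7 := by omega
      rw [h2, h]; decide

theorem start_lt (f : Int) : (PySem.Int.mod (f + 5) 7).toNat < 7 := by
  have h1 := PySem.Int.mod_lt (f + 5) (b := 7) (by omega)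
  have h2 := PySem.Int.mod_nonneg (f + 5) (b := 7) (by omega)
  omega

theorem rows_eq (sdi : Nat) (h : sdi < 7) (N : Int)
    (hN : N = 28 ∨ N = 29 ∨ N = 30 ∨ N = 31) : rowsA sdi N = rowsB sdi N := by
  rcases hN with rfl | rfl | rfl | rfl <;> interval_cases sdi <;> decide

-- ===== VERDICT (by name: the statement is the Claim_ definition above) =====
theorem display_month_spec : Claim_equal_display_month := by
  intro year month _hdom hpre
  obtain ⟨h1, h2⟩ := hpre
  show display_month year month = display_month_alt year month
  simp only [display_month, display_month_alt, get_first_day_of_month, is_leap_year]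
  by_cases hl : ((PySem.Int.mod year 4 == 0 && !(PySem.Int.mod year 100 == 0)) ||
      PySem.Int.mod year 400 == 0) = true <;>
    simp only [hl, if_true, if_false, Bool.false_eq_true] <;>
    · rw [sdi_start]
      congr 1
      congr 1
      congr 1
      apply rows_eq _ (start_lt _)
      interval_cases month <;> decide
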